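-- pv_equiv track=rewrite | github.com/AndreiBlindu/ILP_protein_folding | utils_3d.py | neighboring_set_3d
-- ===== SOURCE A (Python) =====
-- def neighboring_set_3d(v, l_size):
--     lattice_size = l_size*l_size*l_size
--     l2 = l_size*l_size
--     n_set = []
--
--     for k in range(lattice_size):
--         if (k == v-1 and (k+1)%l_size != 0) or (k == v+1 and k%l_size != 0) or (k == v-l_size and k // l2 == v // l2) or (k == v+l_size and k // l2 == v // l2) or k == v+l2 or k == v-l2 :
--             n_set.append(k)
--
--     return n_set
-- ===== SOURCE B (Python) =====
-- def neighboring_set_3d(v, l_size):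
--     if l_size <= 0:
--         return []
--     l2 = l_size * l_size
--     n = l2 * l_size
--     cands = [v - l2]
--     if (v - l_size) // l2 == v // l2:
--         cands.append(v - l_size)
--     if v % l_size != 0:
--         cands.append(v - 1)
--     if (v + 1) % l_size != 0:
--         cands.append(v + 1)
--     if (v + l_size) // l2 == v // l2:
--         cands.append(v + l_size)
--     cands.append(v + l2)
--     return sorted(k for k in set(cands) if 0 <= k < n)
-- ===== Notes on version B (the rewrite author's own statement) =====
-- stated objective: faster
-- what changed: Instead of scanning all l_size^3 lattice cells and testing each against the six neighbor patterns, B tests the six candidate neighbor offsets directly (each with its boundary condition), dedupes them and returns them sorted.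
import Mathlib
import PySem

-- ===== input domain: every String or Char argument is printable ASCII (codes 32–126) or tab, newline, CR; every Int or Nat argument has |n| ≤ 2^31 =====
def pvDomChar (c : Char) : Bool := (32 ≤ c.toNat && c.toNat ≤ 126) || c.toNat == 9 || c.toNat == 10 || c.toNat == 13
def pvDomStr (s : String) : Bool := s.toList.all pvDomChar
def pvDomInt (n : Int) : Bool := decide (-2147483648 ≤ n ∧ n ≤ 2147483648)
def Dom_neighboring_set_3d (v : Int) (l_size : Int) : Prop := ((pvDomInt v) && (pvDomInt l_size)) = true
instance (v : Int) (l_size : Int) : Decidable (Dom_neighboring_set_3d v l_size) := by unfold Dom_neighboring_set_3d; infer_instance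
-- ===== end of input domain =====

-- B replaces A's scan of all l_size^3 lattice cells by a direct O(1) test of the six candidate neighbours.

-- ===== PORT A =====
def neighboring_set_3d (v : Int) (l_size : Int) : List Int :=
  let lattice_size := l_size * l_size * l_size
  let l2 := l_size * l_size
  (PySem.List.pyRange 0 lattice_size 1).foldl
    (fun n_set k =>
      if (k = v - 1 ∧ PySem.Int.mod (k + 1) l_size ≠ 0) ∨
         (k = v + 1 ∧ PySem.Int.mod k l_size ≠ 0) ∨
         (k = v - l_size ∧ PySem.Int.floordiv k l2 = PySem.Int.floordiv v l2) ∨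
         (k = v + l_size ∧ PySem.Int.floordiv k l2 = PySem.Int.floordiv v l2) ∨
         k = v + l2 ∨ k = v - l2
      then n_set ++ [k] else n_set) []

-- ===== PORT B =====
def neighboring_set_3d_alt (v : Int) (l_size : Int) : List Int :=
  if l_size ≤ 0 then []
  else
    let l2 := l_size * l_size
    let n := l2 * l_size
    let cands : List Int :=
      [v - l2]
      ++ (if PySem.Int.floordiv (v - l_size) l2 = PySem.Int.floordiv v l2 then [v - l_size] else [])
      ++ (if PySem.Int.mod v l_size ≠ 0 then [v - 1] else [])
      ++ (if PySem.Int.mod (v + 1) l_size ≠ 0 then [v + 1] else [])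
      ++ (if PySem.Int.floordiv (v + l_size) l2 = PySem.Int.floordiv v l2 then [v + l_size] else [])
      ++ [v + l2]
    PySem.List.sorted
      ((PySem.Set.ofList cands).filter (fun k => decide (0 ≤ k) && decide (k < n)))
      (fun x => x) false

-- ===== PRECONDITION & SPEC =====
def Spec_neighboring_set_3d (v : Int) (l_size : Int) (out : List Int) : Prop := out = neighboring_set_3d_alt v l_size
instance (v : Int) (l_size : Int) (out : List Int) : Decidable (Spec_neighboring_set_3d v l_size out) := by unfold Spec_neighboring_set_3d; infer_instance

-- ===== CLAIM (what is proved, stated in full; the proofs are below) =====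
def Claim_equal_neighboring_set_3d : Prop := ∀ (v : Int) (l_size : Int), Dom_neighboring_set_3d v l_size → Spec_neighboring_set_3d v l_size (neighboring_set_3d v l_size)

-- ===== LEMMAS AND PROOFS =====

-- ===== VERDICT (by name: the statement is the Claim_ definition above) =====
theorem neighboring_set_3d_spec : Claim_equal_neighboring_set_3d := by
  intro v l _
  unfold Spec_neighboring_set_3d neighboring_set_3d neighboring_set_3d_alt
  rw [PySem.List.foldl_append_ite_eq_filter, List.nil_append]
  by_cases hl : l ≤ 0
  · rw [if_pos hl, PySem.List.pyRange_one_eq_nil (by nlinarith [mul_self_nonneg l])]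
    rfl
  · rw [if_neg hl]
    rw [Int.not_le] at hl
    symm
    apply PySem.List.sorted_eq_of_perm_of_pairwise_lt
    · rw [List.perm_ext_iff_of_nodup
        ((PySem.List.nodup_pyRange_one 0 _).filter _)
        ((PySem.Set.nodup_ofList _).filter _)]
      intro a
      simp only [List.mem_filter, PySem.List.mem_pyRange_one,
        PySem.Set.mem_ofList, List.mem_append, List.mem_singleton,
        List.mem_ite_nil_right, decide_eq_true_iff, Bool.and_eq_true, or_assoc]
      have hv : v - 1 + 1 = v := by ring
      constructor
      · rintro ⟨⟨h0, hn⟩, hp⟩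
        refine ⟨?_, h0, hn⟩
        rcases hp with ⟨rfl, h⟩ | ⟨rfl, h⟩ | ⟨rfl, h⟩ | ⟨rfl, h⟩ | rfl | rfl
        · rw [hv] at h
          exact Or.inr (Or.inr (Or.inl ⟨h, rfl⟩))
        · exact Or.inr (Or.inr (Or.inr (Or.inl ⟨h, rfl⟩)))
        · exact Or.inr (Or.inl ⟨h, rfl⟩)
        · exact Or.inr (Or.inr (Or.inr (Or.inr (Or.inl ⟨h, rfl⟩))))
        · exact Or.inr (Or.inr (Or.inr (Or.inr (Or.inr rfl))))
        · exact Or.inl rfl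
      · rintro ⟨hp, h0, hn⟩
        refine ⟨⟨h0, hn⟩, ?_⟩
        rcases hp with rfl | ⟨h, rfl⟩ | ⟨h, rfl⟩ | ⟨h, rfl⟩ | ⟨h, rfl⟩ | rfl
        · exact Or.inr (Or.inr (Or.inr (Or.inr (Or.inr rfl))))
        · exact Or.inr (Or.inr (Or.inl ⟨rfl, h⟩))
        · exact Or.inl ⟨rfl, by rw [hv]; exact h⟩
        · exact Or.inr (Or.inl ⟨rfl, h⟩)
        · exact Or.inr (Or.inr (Or.inr (Or.inl ⟨rfl, h⟩)))
        · exact Or.inr (Or.inr (Or.inr (Or.inr (Or.inl rfl))))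
    · exact (PySem.List.pairwise_lt_pyRange_one 0 _).filter _
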